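-- pv_equiv track=rewrite | github.com/NaayoungKwon/AlgorithmStudy | 백준/Gold/15683. 감시/감시.py | solution
-- ===== SOURCE A (Python) =====
-- def dir(arr, k):
--     if k == 1:
--         return arr
--     elif k == 2:
--         return [arr[0] | arr[2], arr[1] | arr[3]]
--     elif k == 3:
--         return [arr[0] | arr[1], arr[1] | arr[2],  arr[2] | arr[3] , arr[3] | arr[0] ]
--     elif k == 4:
--         return [arr[0] | arr[1] | arr[2], arr[1] | arr[2] | arr[3], arr[2] | arr[3] | arr[0], arr[3] | arr[0] | arr[1]]
--     elif k == 5: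
--         return [arr[1] | arr[3] | arr[0] | arr[2]]
--
-- def make_set(i,j, pans,n,m):
--     arr = []
--     for a,b in [[0,1],[1,0],[0,-1],[-1,0]]:
--         k = 0
--         s = set()
--         while True:
--             if i + a*k >= n or j + b*k >= m or i + a*k < 0 or j + b*k < 0 or pans[i+ a*k][j + b*k] == 6:
--                 break;
--             if pans[i+ a*k][j + b*k] == 0:
--                 s.add((i+ a*k, j + b*k))
--             k += 1
--         arr.append(s)
--     return dir(arr, pans[i][j]);
--
-- def solution(n, m, pans):
--
--     result = 0;
--     k = 0;
--     block = 0
--     que = []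
--     for i in range(n):
--         for j in range(m):
--             if pans[i][j] in [1,2,3,4,5]:
--                 k += 1;
--                 que.append((i,j))
--             elif pans[i][j] == 6:
--                 block += 1
--     boards = [[] for _ in range(k)]
--     if len(que) == 0:
--         return n*m - block
--
--     for i in range(k):
--         s_list = make_set(que[i][0], que[i][1], pans,n,m)
--         for s in s_list:
--             for b in (boards[i-1] if i > 0 else [set()]):
--                 new_s = s | b
--                 boards[i].append(new_s)
--
--     for i in range(len(boards[k-1])):
--         result = max(result, len(boards[k-1][i]))
--     return n*m - len(que) - block - result
-- ===== SOURCE B (Python) =====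
-- def dir(arr, k):
--     if k == 1:
--         return arr
--     elif k == 2:
--         return [arr[0] | arr[2], arr[1] | arr[3]]
--     elif k == 3:
--         return [arr[0] | arr[1], arr[1] | arr[2],  arr[2] | arr[3] , arr[3] | arr[0] ]
--     elif k == 4:
--         return [arr[0] | arr[1] | arr[2], arr[1] | arr[2] | arr[3], arr[2] | arr[3] | arr[0], arr[3] | arr[0] | arr[1]]
--     elif k == 5:
--         return [arr[1] | arr[3] | arr[0] | arr[2]]
--
-- def make_set(i,j, pans,n,m):
--     arr = []
--     for a,b in [[0,1],[1,0],[0,-1],[-1,0]]: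
--         k = 0
--         s = set()
--         while True:
--             if i + a*k >= n or j + b*k >= m or i + a*k < 0 or j + b*k < 0 or pans[i+ a*k][j + b*k] == 6:
--                 break
--             if pans[i+ a*k][j + b*k] == 0:
--                 s.add((i+ a*k, j + b*k))
--             k += 1
--         arr.append(s)
--     return dir(arr, pans[i][j])
--
-- def solution(n, m, pans):
--     # two comprehension passes instead of A's single accumulating scan
--     cams = [(i, j) for i in range(n) for j in range(m) if pans[i][j] in (1, 2, 3, 4, 5)]
--     block = sum(1 for i in range(n) for j in range(m) if pans[i][j] == 6)
--     if not cams: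
--         return n * m - block
--     options = [make_set(i, j, pans, n, m) for i, j in cams]
--     best = 0
--
--     def dfs(idx, covered):
--         nonlocal best
--         if idx == len(options):
--             best = max(best, len(covered))
--             return
--         for s in options[idx]:
--             dfs(idx + 1, s | covered)
--
--     dfs(0, set())
--     return n * m - len(cams) - block - best
-- ===== Notes on version B (the rewrite author's own statement) =====
-- stated objective: alternative
-- what changed: B replaces A's boards table (which stores the full cartesian product of per-camera coverage-set unions, level by level, with indexed reads/writes) by a recursive DFS that walks one orientation combination at a time with a single accumulated covered-set and a running max, and computes the camera list and wall count in two comprehension passes instead of A's single triple-accumulator scan.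
import Mathlib
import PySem

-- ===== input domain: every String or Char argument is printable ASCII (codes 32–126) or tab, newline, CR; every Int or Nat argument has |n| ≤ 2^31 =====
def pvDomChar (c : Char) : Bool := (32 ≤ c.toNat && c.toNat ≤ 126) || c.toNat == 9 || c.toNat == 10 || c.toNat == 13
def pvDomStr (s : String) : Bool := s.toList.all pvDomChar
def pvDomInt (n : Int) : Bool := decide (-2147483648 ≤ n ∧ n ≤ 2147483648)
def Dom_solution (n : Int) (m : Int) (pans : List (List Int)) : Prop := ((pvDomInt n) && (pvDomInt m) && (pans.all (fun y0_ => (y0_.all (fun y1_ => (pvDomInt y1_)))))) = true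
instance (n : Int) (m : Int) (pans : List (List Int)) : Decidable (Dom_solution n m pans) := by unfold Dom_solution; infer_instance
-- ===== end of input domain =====

-- B replaces A's stored product of coverage-set unions by a DFS over one combination path at a
-- time (O(depth) working sets instead of the full product list); make_set/dir are shared helpers,
-- reused unchanged by Source B exactly as in the Python module.

-- ===== PORT A =====
-- shared helpers (Source B reuses make_set/dir verbatim, so both ports use these)

-- pans[i][j]; total form with junk default 7 — exact under Pre_solution's in-range guarantee
def gridAt (pans : List (List Int)) (i j : Int) : Int :=
  PySem.List.pyGetD (PySem.List.pyGetD pans i []) j 7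

-- Python dir(arr, k); callers only pass k ∈ {1,…,5} (the unreachable else returns [])
def dirSets (arr : List (PySem.Set (Int × Int))) (k : Int) : List (PySem.Set (Int × Int)) :=
  let a0 := PySem.List.pyGetD arr 0 []
  let a1 := PySem.List.pyGetD arr 1 []
  let a2 := PySem.List.pyGetD arr 2 []
  let a3 := PySem.List.pyGetD arr 3 []
  if k = 1 then arr
  else if k = 2 then [PySem.Set.union a0 a2, PySem.Set.union a1 a3]
  else if k = 3 then [PySem.Set.union a0 a1, PySem.Set.union a1 a2, PySem.Set.union a2 a3, PySem.Set.union a3 a0]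
  else if k = 4 then [PySem.Set.union (PySem.Set.union a0 a1) a2, PySem.Set.union (PySem.Set.union a1 a2) a3,
                      PySem.Set.union (PySem.Set.union a2 a3) a0, PySem.Set.union (PySem.Set.union a3 a0) a1]
  else if k = 5 then [PySem.Set.union (PySem.Set.union (PySem.Set.union a1 a3) a0) a2]
  else []

-- the 'while True' ray walk of make_set; fuel-total (fuel n.toNat+m.toNat+2 ≥ any ray length)
def rayLoop (pans : List (List Int)) (n m i j a b : Int) : Nat → Int → PySem.Set (Int × Int) → PySem.Set (Int × Int)
  | 0, _, s => s
  | fuel + 1, k, s =>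
    if i + a * k ≥ n ∨ j + b * k ≥ m ∨ i + a * k < 0 ∨ j + b * k < 0 ∨ gridAt pans (i + a * k) (j + b * k) = 6 then s
    else rayLoop pans n m i j a b fuel (k + 1)
      (if gridAt pans (i + a * k) (j + b * k) = 0 then PySem.Set.add s (i + a * k, j + b * k) else s)

-- Python make_set(i, j, pans, n, m)
def makeSet (i j : Int) (pans : List (List Int)) (n m : Int) : List (PySem.Set (Int × Int)) :=
  let arr := ([((0 : Int), (1 : Int)), (1, 0), (0, -1), (-1, 0)]).foldl
    (fun arr ab => arr ++ [rayLoop pans n m i j ab.1 ab.2 (n.toNat + m.toNat + 2) 0 PySem.Set.empty]) []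
  dirSets arr (gridAt pans i j)

def solution (n : Int) (m : Int) (pans : List (List Int)) : Int :=
  let st := (PySem.List.pyRange 0 n 1).foldl (fun st i =>
    (PySem.List.pyRange 0 m 1).foldl (fun st j =>
      if gridAt pans i j ∈ ([1, 2, 3, 4, 5] : List Int) then (st.1 + 1, st.2.1, st.2.2 ++ [(i, j)])
      else if gridAt pans i j = 6 then (st.1, st.2.1 + 1, st.2.2)
      else st) st) ((0 : Int), (0 : Int), ([] : List (Int × Int)))
  let k := st.1
  let block := st.2.1
  let que := st.2.2
  let boards0 : List (List (PySem.Set (Int × Int))) := (PySem.List.pyRange 0 k 1).map (fun _ => [])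
  if PySem.List.len que = 0 then n * m - block
  else
    let boards := (PySem.List.pyRange 0 k 1).foldl (fun boards i =>
      let q := PySem.List.pyGetD que i (0, 0)
      let sList := makeSet q.1 q.2 pans n m
      let prev := if i > 0 then PySem.List.pyGetD boards (i - 1) [] else [PySem.Set.empty]
      -- the two nested append loops, as the comprehension they build (same order, same unions;
      -- Python's list.append is O(1), a literal `acc ++ [x]` fold is quadratic and uncomputable here)
      let newList := PySem.List.pyGetD boards i [] ++
        sList.flatMap (fun s => prev.map (fun b => PySem.Set.union s b))
      PySem.List.pySetD boards i newList) boards0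
    let last := PySem.List.pyGetD boards (k - 1) []
    -- Python's `for i in range(len(last)): result = max(result, len(last[i]))` is exactly this left
    -- fold over last (PySem.List.foldl_pyRange_zero_pyGetD); indexing each i is quadratic in Lean
    let result := last.foldl (fun result b => max result (PySem.Set.len b)) 0
    n * m - PySem.List.len que - block - result

-- ===== PORT B =====
-- v in (1, 2, 3, 4, 5)
def camPred (v : Int) : Bool := v == 1 || v == 2 || v == 3 || v == 4 || v == 5

-- the nonlocal-best DFS of Source B, recursing on the remaining option lists
def dfsB : List (List (PySem.Set (Int × Int))) → PySem.Set (Int × Int) → Int → Int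
  | [], covered, best => max best (PySem.Set.len covered)
  | o :: rest, covered, best => o.foldl (fun best s => dfsB rest (PySem.Set.union s covered) best) best

def solution_alt (n : Int) (m : Int) (pans : List (List Int)) : Int :=
  let cams := (PySem.List.pyRange 0 n 1).flatMap (fun i =>
    ((PySem.List.pyRange 0 m 1).filter (fun j => camPred (gridAt pans i j))).map (fun j => (i, j)))
  let block : Int := ((PySem.List.pyRange 0 n 1).flatMap (fun i =>
    (PySem.List.pyRange 0 m 1).filter (fun j => gridAt pans i j == 6))).length
  if cams = [] then n * m - block
  else
    let options := cams.map (fun c => makeSet c.1 c.2 pans n m)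
    n * m - PySem.List.len cams - block - dfsB options PySem.Set.empty 0

-- ===== PRECONDITION & SPEC =====
-- Pre_ excludes exactly the inputs where A raises IndexError: a positive n×m scan over a pans
-- whose list of rows is shorter than n, or one of whose first n rows is shorter than m.
def Pre_solution (n : Int) (m : Int) (pans : List (List Int)) : Prop :=
  0 < n → 0 < m → (n ≤ (pans.length : Int) ∧ ∀ row ∈ pans.take n.toNat, m ≤ (row.length : Int))
instance (n : Int) (m : Int) (pans : List (List Int)) : Decidable (Pre_solution n m pans) := by
  unfold Pre_solution; infer_instance
def pvWitness_solution : Int × Int × List (List Int) := (2, 2, [[1, 0], [0, 6]])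

def Spec_solution (n : Int) (m : Int) (pans : List (List Int)) (out : Int) : Prop := out = solution_alt n m pans
instance (n : Int) (m : Int) (pans : List (List Int)) (out : Int) : Decidable (Spec_solution n m pans out) := by unfold Spec_solution; infer_instance

-- ===== CLAIM (what is proved, stated in full; the proofs are below) =====
def Claim_equal_solution : Prop := ∀ (n : Int) (m : Int) (pans : List (List Int)), Dom_solution n m pans → Pre_solution n m pans → Spec_solution n m pans (solution n m pans)


-- ===== LEMMAS AND PROOFS =====

theorem pvWitness_ok : Dom_solution pvWitness_solution.1 pvWitness_solution.2.1 pvWitness_solution.2.2 ∧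
    Pre_solution pvWitness_solution.1 pvWitness_solution.2.1 pvWitness_solution.2.2 := by decide

-- ---- proof-only helper definitions ----

-- one product step of A's boards construction: all unions of an option with a previous board
def stepL (o : List (PySem.Set (Int × Int))) (B : List (PySem.Set (Int × Int))) : List (PySem.Set (Int × Int)) :=
  o.flatMap (fun s => B.map (fun b => PySem.Set.union s b))

-- A's level-r board list (product of the first r option lists)
def lvlT (opts : List (List (PySem.Set (Int × Int)))) (r : Nat) : List (PySem.Set (Int × Int)) :=
  (opts.take r).foldl (fun B o => stepL o B) [PySem.Set.empty]

-- the common value: best coverage reachable from accumulated set c over the remaining option lists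
def Mx : List (List (PySem.Set (Int × Int))) → PySem.Set (Int × Int) → Int
  | [], c => PySem.Set.len c
  | o :: os, c => o.foldl (fun r s => max r (Mx os (PySem.Set.union s c))) 0

-- A's boards loop body, named for the invariant lemma (definitionally the port's lambda)
def aStep (pans : List (List Int)) (n m : Int) (que : List (Int × Int))
    (boards : List (List (PySem.Set (Int × Int)))) (i : Int) : List (List (PySem.Set (Int × Int))) :=
  PySem.List.pySetD boards i
    (PySem.List.pyGetD boards i [] ++
      (makeSet (PySem.List.pyGetD que i (0, 0)).1 (PySem.List.pyGetD que i (0, 0)).2 pans n m).flatMap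
        (fun s => (if i > 0 then PySem.List.pyGetD boards (i - 1) [] else [PySem.Set.empty]).map
          (fun b => PySem.Set.union s b)))

def boardsT (pans : List (List Int)) (n m : Int) (que : List (Int × Int)) (t : Nat) :
    List (List (PySem.Set (Int × Int))) :=
  (PySem.List.pyRange 0 (t : Int) 1).foldl (aStep pans n m que)
    ((PySem.List.pyRange 0 ((que.length : Nat) : Int) 1).map (fun _ => []))

-- ---- generic max-fold lemmas ----

theorem foldl_congr_memg {α β : Type} (l : List α) (f g : β → α → β) (init : β)
    (h : ∀ (acc : β) (x : α), x ∈ l → f acc x = g acc x) : l.foldl f init = l.foldl g init := by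
  induction l generalizing init with
  | nil => rfl
  | cons x l ih =>
    simp only [List.foldl_cons]
    rw [h init x (by simp)]
    exact ih _ (fun acc y hy => h acc y (by simp [hy]))

theorem gmax_init {σ : Type} (f : Int → σ → Int)
    (hf : ∀ (a b : Int) (x : σ), f (max a b) x = max a (f b x)) :
    ∀ (l : List σ) (a b : Int), l.foldl f (max a b) = max a (l.foldl f b) := by
  intro l
  induction l with
  | nil => intro a b; rfl
  | cons x l ih => intro a b; simp only [List.foldl_cons, hf]; exact ih a (f b x)

theorem le_foldl_maxg {σ : Type} (g : σ → Int) :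
    ∀ (l : List σ) (a : Int), a ≤ l.foldl (fun r x => max r (g x)) a := by
  intro l
  induction l with
  | nil => intro a; exact le_refl a
  | cons x l ih => intro a; exact le_trans (le_max_left a (g x)) (ih (max a (g x)))

theorem foldl_max_distrib {σ : Type} (g1 g2 : σ → Int) :
    ∀ (B : List σ) (a1 a2 : Int),
      max (B.foldl (fun r b => max r (g1 b)) a1) (B.foldl (fun r b => max r (g2 b)) a2)
      = B.foldl (fun r b => max r (max (g1 b) (g2 b))) (max a1 a2) := by
  intro B
  induction B with
  | nil => intro a1 a2; rfl
  | cons b B ih =>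
    intro a1 a2
    simp only [List.foldl_cons]
    rw [ih (max a1 (g1 b)) (max a2 (g2 b)), max_max_max_comm]

theorem foldl_max_zero {τ : Type} : ∀ (B : List τ) (a : Int), 0 ≤ a →
    B.foldl (fun r (_ : τ) => max r 0) a = a := by
  intro B
  induction B with
  | nil => intro a _; rfl
  | cons b B ih =>
    intro a ha
    simp only [List.foldl_cons, max_eq_left ha]
    exact ih a ha

theorem foldl_flatMapg {α β γ : Type} (g : α → List β) (f : γ → β → γ) :
    ∀ (l : List α) (z : γ), (l.flatMap g).foldl f z = l.foldl (fun r x => (g x).foldl f r) z := by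
  intro l
  induction l with
  | nil => intro z; rfl
  | cons x l ih => intro z; simp only [List.flatMap_cons, List.foldl_append, List.foldl_cons, ih]

-- exchanging the nesting order of a double max-fold
theorem exchangeg {σ τ : Type} (h : σ → τ → Int) :
    ∀ (o : List σ) (B : List τ),
      o.foldl (fun r s => B.foldl (fun r' b => max r' (h s b)) r) 0
      = B.foldl (fun r b => max r (o.foldl (fun r' s => max r' (h s b)) 0)) 0 := by
  intro o
  induction o with
  | nil =>
    intro B
    simp only [List.foldl_nil]
    exact (foldl_max_zero B 0 le_rfl).symm
  | cons s o' ih =>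
    intro B
    simp only [List.foldl_cons]
    have hI : (0 : Int) ≤ B.foldl (fun r' b => max r' (h s b)) 0 := le_foldl_maxg _ B 0
    have hlin : ∀ (x : σ) (a r : Int),
        B.foldl (fun r' b => max r' (h x b)) (max a r) = max a (B.foldl (fun r' b => max r' (h x b)) r) :=
      fun x a r => gmax_init _ (fun a' b' y => by rw [max_assoc]) B a r
    have h1 : o'.foldl (fun r s => B.foldl (fun r' b => max r' (h s b)) r)
          (B.foldl (fun r' b => max r' (h s b)) 0)
        = max (B.foldl (fun r' b => max r' (h s b)) 0)
            (o'.foldl (fun r s => B.foldl (fun r' b => max r' (h s b)) r) 0) := by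
      conv_lhs => rw [show B.foldl (fun r' b => max r' (h s b)) 0
          = max (B.foldl (fun r' b => max r' (h s b)) 0) 0 from (max_eq_left hI).symm]
      exact gmax_init _ (fun a r x => hlin x a r) o' _ 0
    rw [h1, ih B]
    have h2 : ∀ (r : Int) (b : τ), b ∈ B →
        max r (o'.foldl (fun r' s => max r' (h s b)) (max 0 (h s b)))
        = max r (max (h s b) (o'.foldl (fun r' s => max r' (h s b)) 0)) := by
      intro r b _
      rw [max_comm (0 : Int) (h s b), gmax_init _ (fun a' b' y => by rw [max_assoc]) o' _ 0]
    rw [foldl_congr_memg B _ _ 0 h2]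
    have h3 := foldl_max_distrib (fun b => h s b) (fun b => o'.foldl (fun r' s => max r' (h s b)) 0) B 0 0
    simp only [max_self] at h3
    rw [← h3]

theorem dfs_eq : ∀ (os : List (List (PySem.Set (Int × Int)))) (c : PySem.Set (Int × Int)) (best : Int),
    0 ≤ best → dfsB os c best = max best (Mx os c) := by
  intro os
  induction os with
  | nil => intro c best _; rfl
  | cons o os ih =>
    intro c best hb
    show o.foldl (fun best s => dfsB os (PySem.Set.union s c) best) best = max best (Mx (o :: os) c)
    have aux : ∀ (o' : List (PySem.Set (Int × Int))) (b : Int), 0 ≤ b →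
        o'.foldl (fun best s => dfsB os (PySem.Set.union s c) best) b
        = max b (o'.foldl (fun r s => max r (Mx os (PySem.Set.union s c))) 0) := by
      intro o'
      induction o' with
      | nil => intro b hb0; simp only [List.foldl_nil]; exact (max_eq_left hb0).symm
      | cons s o'' ih2 =>
        intro b hb0
        simp only [List.foldl_cons]
        rw [ih (PySem.Set.union s c) b hb0]
        rw [ih2 _ (le_trans hb0 (le_max_left _ _))]
        have h3 : o''.foldl (fun r s => max r (Mx os (PySem.Set.union s c)))
              (max 0 (Mx os (PySem.Set.union s c)))
            = max (Mx os (PySem.Set.union s c))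
                (o''.foldl (fun r s => max r (Mx os (PySem.Set.union s c))) 0) := by
          rw [max_comm (0 : Int)]
          exact gmax_init _ (fun a b x => by rw [max_assoc]) o'' _ 0
        rw [h3, max_assoc]
    exact aux o best hb

theorem lvl_max : ∀ (os : List (List (PySem.Set (Int × Int)))) (B : List (PySem.Set (Int × Int))),
    (os.foldl (fun B o => stepL o B) B).foldl (fun r b => max r (PySem.Set.len b)) 0
    = B.foldl (fun r b => max r (Mx os b)) 0 := by
  intro os
  induction os with
  | nil => intro B; rfl
  | cons o os ih =>
    intro B
    simp only [List.foldl_cons]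
    rw [ih (stepL o B)]
    show (stepL o B).foldl (fun r b => max r (Mx os b)) 0 = B.foldl (fun r b => max r (Mx (o :: os) b)) 0
    rw [stepL, foldl_flatMapg]
    have h1 : ∀ (r : Int) (s : PySem.Set (Int × Int)), s ∈ o →
        (B.map (fun b => PySem.Set.union s b)).foldl (fun r b => max r (Mx os b)) r
        = B.foldl (fun r' b => max r' (Mx os (PySem.Set.union s b))) r := by
      intro r s _; rw [List.foldl_map]
    rw [foldl_congr_memg o _ _ 0 h1]
    rw [exchangeg (fun s b => Mx os (PySem.Set.union s b)) o B]
    rfl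

-- ---- scan lemmas ----

theorem camPred_iff (v : Int) : camPred v = true ↔ v ∈ ([1, 2, 3, 4, 5] : List Int) := by
  simp [camPred]; tauto

theorem row_scan (pans : List (List Int)) (i : Int) :
    ∀ (M : List Int) (st : Int × Int × List (Int × Int)),
      M.foldl (fun st j =>
        if gridAt pans i j ∈ ([1, 2, 3, 4, 5] : List Int) then (st.1 + 1, st.2.1, st.2.2 ++ [(i, j)])
        else if gridAt pans i j = 6 then (st.1, st.2.1 + 1, st.2.2)
        else st) st
      = (st.1 + ((M.filter (fun j => camPred (gridAt pans i j))).length : Int),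
         st.2.1 + ((M.filter (fun j => gridAt pans i j == 6)).length : Int),
         st.2.2 ++ (M.filter (fun j => camPred (gridAt pans i j))).map (fun j => (i, j))) := by
  intro M
  induction M with
  | nil => intro st; simp
  | cons j M ih =>
    intro st
    simp only [List.foldl_cons]
    by_cases hc : gridAt pans i j ∈ ([1, 2, 3, 4, 5] : List Int)
    · have hcb : camPred (gridAt pans i j) = true := (camPred_iff _).mpr hc
      have h6 : (gridAt pans i j == 6) = false := by
        simp only [beq_eq_false_iff_ne, ne_eq]
        intro hh
        rw [hh] at hc
        simp at hc
      have e1 : List.filter (fun j => camPred (gridAt pans i j)) (j :: M)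
          = j :: List.filter (fun j => camPred (gridAt pans i j)) M := by
        simp [hcb]
      have e2 : List.filter (fun j => gridAt pans i j == 6) (j :: M)
          = List.filter (fun j => gridAt pans i j == 6) M := by
        simp [h6]
      rw [if_pos hc, ih, e1, e2]
      refine Prod.ext_iff.mpr ⟨?_, Prod.ext_iff.mpr ⟨?_, ?_⟩⟩
      · dsimp only; simp only [List.length_cons]; push_cast; omega
      · dsimp only
      · dsimp only [List.map_cons]; simp
    · have hcb : camPred (gridAt pans i j) = false := by
        rw [Bool.eq_false_iff]; intro hh; exact hc ((camPred_iff _).mp hh)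
      have e1 : List.filter (fun j => camPred (gridAt pans i j)) (j :: M)
          = List.filter (fun j => camPred (gridAt pans i j)) M := by
        simp [hcb]
      rw [if_neg hc]
      by_cases h6 : gridAt pans i j = 6
      · have h6b : (gridAt pans i j == 6) = true := by simp [h6]
        have e2 : List.filter (fun j => gridAt pans i j == 6) (j :: M)
            = j :: List.filter (fun j => gridAt pans i j == 6) M := by
          simp [h6b]
        rw [if_pos h6, ih, e1, e2]
        refine Prod.ext_iff.mpr ⟨?_, Prod.ext_iff.mpr ⟨?_, ?_⟩⟩
        · dsimp only
        · dsimp only; simp only [List.length_cons]; push_cast; omega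
        · dsimp only
      · have h6b : (gridAt pans i j == 6) = false := by simp [h6]
        have e2 : List.filter (fun j => gridAt pans i j == 6) (j :: M)
            = List.filter (fun j => gridAt pans i j == 6) M := by
          simp [h6b]
        rw [if_neg h6, ih, e1, e2]

theorem full_scan (pans : List (List Int)) (m : Int) :
    ∀ (L : List Int) (st : Int × Int × List (Int × Int)),
      L.foldl (fun st i =>
        (PySem.List.pyRange 0 m 1).foldl (fun st j =>
          if gridAt pans i j ∈ ([1, 2, 3, 4, 5] : List Int) then (st.1 + 1, st.2.1, st.2.2 ++ [(i, j)])
          else if gridAt pans i j = 6 then (st.1, st.2.1 + 1, st.2.2)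
          else st) st) st
      = (st.1 + ((L.flatMap (fun i => (PySem.List.pyRange 0 m 1).filter (fun j => camPred (gridAt pans i j)))).length : Int),
         st.2.1 + ((L.flatMap (fun i => (PySem.List.pyRange 0 m 1).filter (fun j => gridAt pans i j == 6))).length : Int),
         st.2.2 ++ L.flatMap (fun i =>
           ((PySem.List.pyRange 0 m 1).filter (fun j => camPred (gridAt pans i j))).map (fun j => (i, j)))) := by
  intro L
  induction L with
  | nil => intro st; simp
  | cons i L ih =>
    intro st
    simp only [List.foldl_cons]
    rw [row_scan pans i, ih]
    simp only [List.flatMap_cons, List.length_append]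
    refine Prod.ext_iff.mpr ⟨?_, Prod.ext_iff.mpr ⟨?_, ?_⟩⟩
    · dsimp only; push_cast; ring
    · dsimp only; push_cast; ring
    · dsimp only; simp [List.append_assoc]

-- ---- boards invariant ----

theorem boards_inv (pans : List (List Int)) (n m : Int) (que : List (Int × Int)) :
    ∀ (t : Nat), t ≤ que.length →
      ((boardsT pans n m que t).length = que.length) ∧
      (∀ (j : Nat), j < que.length →
        PySem.List.pyGetD (boardsT pans n m que t) (j : Int) []
        = if j < t then lvlT (que.map (fun c => makeSet c.1 c.2 pans n m)) (j + 1) else []) := by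
  intro t
  induction t with
  | zero =>
    intro _
    constructor
    · simp [boardsT, PySem.List.pyRange_one_eq_nil (le_refl (0 : Int)),
        PySem.List.length_pyRange_one]
    · intro j hj
      simp only [boardsT, Nat.cast_zero, PySem.List.pyRange_one_eq_nil (le_refl (0 : Int)),
        List.foldl_nil, Nat.not_lt_zero, if_false]
      rw [PySem.List.pyGetD_map_pyRange (fun _ => []) que.length j [] hj]
  | succ t iht =>
    intro ht
    have ht' : t ≤ que.length := Nat.le_of_succ_le ht
    have htlt : t < que.length := ht
    obtain ⟨ihlen, ihget⟩ := iht ht'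
    have hsplit : boardsT pans n m que (t + 1) = aStep pans n m que (boardsT pans n m que t) (t : Int) := by
      unfold boardsT
      rw [show ((t + 1 : Nat) : Int) = (t : Int) + 1 by push_cast; ring,
        PySem.List.pyRange_one_succ_right (Int.natCast_nonneg t), List.foldl_append,
        List.foldl_cons, List.foldl_nil]
    have hq : PySem.List.pyGetD que (t : Int) (0, 0) = que[t] := by
      simp only [PySem.List.pyGetD_natCast]
      exact List.getD_eq_getElem que (0, 0) htlt
    have hprev : (if (t : Int) > 0 then PySem.List.pyGetD (boardsT pans n m que t) ((t : Int) - 1) []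
          else [PySem.Set.empty])
        = lvlT (que.map (fun c => makeSet c.1 c.2 pans n m)) t := by
      rcases Nat.eq_zero_or_pos t with h0 | hpos
      · subst h0; simp [lvlT]
      · rw [if_pos (by exact_mod_cast hpos)]
        rw [show ((t : Int) - 1) = ((t - 1 : Nat) : Int) by push_cast [Nat.cast_sub hpos]; ring]
        rw [ihget (t - 1) (by omega)]
        rw [if_pos (by omega)]
        congr 1
        omega
    have hacc : PySem.List.pyGetD (boardsT pans n m que t) (t : Int) [] = [] := by
      rw [ihget t htlt]; simp
    have hlvl : lvlT (que.map (fun c => makeSet c.1 c.2 pans n m)) (t + 1)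
        = stepL (makeSet que[t].1 que[t].2 pans n m)
            (lvlT (que.map (fun c => makeSet c.1 c.2 pans n m)) t) := by
      unfold lvlT
      rw [List.take_add_one]
      have hlt : t < (que.map (fun c => makeSet c.1 c.2 pans n m)).length := by
        simpa using htlt
      rw [List.getElem?_eq_getElem hlt]
      simp only [Option.toList_some, List.foldl_append, List.foldl_cons, List.foldl_nil,
        List.getElem_map]
    rw [hsplit]
    unfold aStep
    rw [hq, hprev, hacc]
    simp only [List.nil_append]
    rw [show (makeSet que[t].1 que[t].2 pans n m).flatMap
        (fun s => (lvlT (que.map (fun c => makeSet c.1 c.2 pans n m)) t).map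
          (fun b => PySem.Set.union s b))
      = stepL (makeSet que[t].1 que[t].2 pans n m)
          (lvlT (que.map (fun c => makeSet c.1 c.2 pans n m)) t) from rfl]
    constructor
    · rw [PySem.List.length_pySetD]; exact ihlen
    · intro j hj
      rw [PySem.List.pyGetD_pySetD_natCast (boardsT pans n m que t) t j
        (stepL (makeSet que[t].1 que[t].2 pans n m)
          (lvlT (que.map (fun c => makeSet c.1 c.2 pans n m)) t)) []
        (by rw [ihlen]; exact htlt)]
      by_cases hjt : j = t
      · subst hjt
        rw [if_pos rfl, if_pos (by omega), hlvl]
      · rw [if_neg (by exact_mod_cast hjt), ihget j hj]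
        by_cases hjlt : j < t
        · rw [if_pos hjlt, if_pos (by omega)]
        · rw [if_neg hjlt, if_neg (by omega)]

-- ===== VERDICT (by name: the statement is the Claim_ definition above) =====
theorem solution_spec : Claim_equal_solution := by
  intro n m pans hdom hpre
  unfold Spec_solution
  show solution n m pans = solution_alt n m pans
  simp only [solution, solution_alt]
  rw [full_scan pans m (PySem.List.pyRange 0 n 1) ((0 : Int), (0 : Int), ([] : List (Int × Int)))]
  simp only [zero_add, List.nil_append]
  set cams := (PySem.List.pyRange 0 n 1).flatMap (fun i =>
    ((PySem.List.pyRange 0 m 1).filter (fun j => camPred (gridAt pans i j))).map (fun j => (i, j))) with hcams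
  set camsRaw := (PySem.List.pyRange 0 n 1).flatMap (fun i =>
    (PySem.List.pyRange 0 m 1).filter (fun j => camPred (gridAt pans i j))) with hcamsRaw
  have hlen : camsRaw.length = cams.length := by
    simp only [hcams, hcamsRaw, List.length_flatMap, List.length_map]
  by_cases hnil : cams = []
  · have h0 : PySem.List.len cams = 0 := by rw [hnil]; rfl
    rw [if_pos h0, if_pos hnil]
  · have hA : ¬ (PySem.List.len cams = 0) := by
      simp only [PySem.List.len_eq, Nat.cast_eq_zero, List.length_eq_zero_iff]
      exact hnil
    rw [hlen, if_neg hA, if_neg hnil]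
    have hfun : (fun (boards : List (List (PySem.Set (Int × Int)))) (i : Int) =>
        PySem.List.pySetD boards i
          (PySem.List.pyGetD boards i [] ++
            (makeSet (PySem.List.pyGetD cams i (0, 0)).1 (PySem.List.pyGetD cams i (0, 0)).2 pans n m).flatMap
              (fun s => (if i > 0 then PySem.List.pyGetD boards (i - 1) [] else [PySem.Set.empty]).map
                (fun b => PySem.Set.union s b))))
        = aStep pans n m cams := rfl
    rw [hfun]
    have hbt : List.foldl (aStep pans n m cams)
        (List.map (fun _ => ([] : List (PySem.Set (Int × Int))))
          (PySem.List.pyRange 0 ((cams.length : Nat) : Int) 1))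
        (PySem.List.pyRange 0 ((cams.length : Nat) : Int) 1) = boardsT pans n m cams cams.length := rfl
    rw [hbt]
    set opts := cams.map (fun c => makeSet c.1 c.2 pans n m) with hopts
    obtain ⟨hL, hg⟩ := boards_inv pans n m cams cams.length le_rfl
    have hpos : 0 < cams.length := List.length_pos_of_ne_nil hnil
    have hidx : ((cams.length : Int) - 1) = (((cams.length - 1 : Nat)) : Int) := by omega
    rw [hidx, hg (cams.length - 1) (by omega), if_pos (by omega)]
    have hsucc : cams.length - 1 + 1 = cams.length := by omega
    rw [hsucc]
    have htake : lvlT opts cams.length = opts.foldl (fun B o => stepL o B) [PySem.Set.empty] := by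
      unfold lvlT
      rw [List.take_of_length_le (by simp [hopts])]
    rw [htake]
    rw [lvl_max opts [PySem.Set.empty]]
    rw [dfs_eq opts PySem.Set.empty 0 le_rfl]
    simp only [List.foldl_cons, List.foldl_nil]
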